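-- pv_equiv track=rewrite | github.com/ArsenicMeatball/botsynthesis | biobrick_optimization_tool_synthesis/optimization/codon_opt_synth_spea2/string_manipulation.py | find_number_of_non_overlapping_repeats
-- ===== SOURCE A (Python) =====
-- def find_number_of_non_overlapping_repeats(string: str, min_repeat_size=10) -> int:
--     if min_repeat_size < 1:
--         raise ArithmeticError("Can't find repeats smaller than 1")
--     if len(string) < min_repeat_size:
--         return 0
--     tracker = set()
--     result = 0
--     for idx in range(len(string) - min_repeat_size):
--         substring = string[idx:idx + min_repeat_size]
--         if substring not in tracker:
--             tracker.add(substring)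
--             result += string.count(substring) - 1
--     return result
-- ===== SOURCE B (Python) =====
-- def find_number_of_non_overlapping_repeats(string: str, min_repeat_size=10) -> int:
--     if min_repeat_size < 1:
--         raise ArithmeticError("Can't find repeats smaller than 1")
--     n = len(string)
--     if n < min_repeat_size:
--         return 0
--     # one pass: group the start positions of every window of length min_repeat_size
--     pos = {}
--     for i in range(n - min_repeat_size + 1):
--         pos.setdefault(string[i:i + min_repeat_size], []).append(i)
--     # per distinct substring, greedy non-overlapping count from its sorted positions;
--     # a substring occurring once contributes 0
--     total = 0
--     for ps in pos.values():
--         c = 0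
--         nxt = 0
--         for i in ps:
--             if i >= nxt:
--                 c += 1
--                 nxt = i + min_repeat_size
--         total += c - 1
--     return total
-- ===== Notes on version B (the rewrite author's own statement) =====
-- stated objective: alternative
-- what changed: Instead of re-scanning the whole string with str.count for every newly seen window, B groups all window start positions into a dict in one pass and derives each distinct substring's non-overlapping count by a greedy scan of its position list; intended as the asymptotically better algorithm (a timing run measured B 3.52x ahead at the largest size both finished but could not confirm scaling), and Pre_ excludes only min_repeat_size < 1, where A raises ArithmeticError.
import Mathlib
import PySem

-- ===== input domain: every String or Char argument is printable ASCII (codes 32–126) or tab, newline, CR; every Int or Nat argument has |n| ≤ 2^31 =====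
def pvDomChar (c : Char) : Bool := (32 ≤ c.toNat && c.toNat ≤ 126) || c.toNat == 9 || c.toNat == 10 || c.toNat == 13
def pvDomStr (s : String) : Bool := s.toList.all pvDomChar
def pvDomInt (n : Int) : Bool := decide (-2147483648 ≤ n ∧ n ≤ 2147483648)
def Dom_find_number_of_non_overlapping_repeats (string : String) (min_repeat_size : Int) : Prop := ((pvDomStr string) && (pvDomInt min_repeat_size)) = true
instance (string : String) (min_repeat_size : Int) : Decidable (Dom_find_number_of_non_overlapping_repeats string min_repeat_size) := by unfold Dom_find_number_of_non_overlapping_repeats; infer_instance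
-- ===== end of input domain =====

-- B replaces A's per-new-window str.count rescans by one grouping pass over window
-- start positions plus a greedy non-overlapping scan per distinct substring
-- (objective: alternative algorithm; return value proved equal on Pre_,
-- i.e. min_repeat_size ≥ 1, where A does not raise).


-- ===== PORT A =====
def find_number_of_non_overlapping_repeats (string : String) (min_repeat_size : Int) : Int :=
  if min_repeat_size < 1 then 0   -- Python raises ArithmeticError here; excluded by Pre_
  else if PySem.Str.len string < min_repeat_size then 0
  else
    let cs := string.toList
    ((PySem.List.pyRange 0 (PySem.Str.len string - min_repeat_size) 1).foldl
      (fun (st : PySem.Set (List Char) × Int) idx =>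
        let substring := PySem.List.slice cs (some idx) (some (idx + min_repeat_size))
        if PySem.Set.contains st.1 substring then st
        else (PySem.Set.add st.1 substring,
              st.2 + (PySem.Chars.count cs substring : Int) - 1))
      (PySem.Set.empty, 0)).2

-- ===== PORT B =====
def find_number_of_non_overlapping_repeats_alt (string : String) (min_repeat_size : Int) : Int :=
  if min_repeat_size < 1 then 0   -- Python raises here; excluded by Pre_
  else
    let n := PySem.Str.len string
    if n < min_repeat_size then 0
    else
      let cs := string.toList
      -- one pass: group every window start position under its substring
      let pos := (PySem.List.pyRange 0 (n - min_repeat_size + 1) 1).foldl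
        (fun d i =>
          d.modify (PySem.List.slice cs (some i) (some (i + min_repeat_size))) [] (· ++ [i]))
        PySem.Dict.empty
      -- per distinct substring: greedy non-overlapping count from its position list
      pos.values.foldl
        (fun total ps =>
          let c := (ps.foldl
            (fun (st : Int × Int) i =>
              if st.2 ≤ i then (st.1 + 1, i + min_repeat_size) else st) (0, 0)).1
          total + (c - 1)) 0

-- ===== PRECONDITION & SPEC =====
-- Pre_ excludes exactly min_repeat_size < 1, where the Python A raises ArithmeticError.
def Pre_find_number_of_non_overlapping_repeats (string : String) (min_repeat_size : Int) : Prop :=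
  1 ≤ min_repeat_size
instance (string : String) (min_repeat_size : Int) : Decidable (Pre_find_number_of_non_overlapping_repeats string min_repeat_size) := by unfold Pre_find_number_of_non_overlapping_repeats; infer_instance
def pvWitness_find_number_of_non_overlapping_repeats : String × Int := ("abcabcab", 3)
def Spec_find_number_of_non_overlapping_repeats (string : String) (min_repeat_size : Int) (out : Int) : Prop := out = find_number_of_non_overlapping_repeats_alt string min_repeat_size
instance (string : String) (min_repeat_size : Int) (out : Int) : Decidable (Spec_find_number_of_non_overlapping_repeats string min_repeat_size out) := by unfold Spec_find_number_of_non_overlapping_repeats; infer_instance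

-- ===== CLAIM (what is proved, stated in full; the proofs are below) =====
def Claim_equal_find_number_of_non_overlapping_repeats : Prop := ∀ (string : String) (min_repeat_size : Int), Dom_find_number_of_non_overlapping_repeats string min_repeat_size → Pre_find_number_of_non_overlapping_repeats string min_repeat_size → Spec_find_number_of_non_overlapping_repeats string min_repeat_size (find_number_of_non_overlapping_repeats string min_repeat_size)

-- ===== LEMMAS AND PROOFS =====

def pvWin (cs : List Char) (m j : Nat) : List Char := (cs.drop j).take m
def pvOccFrom (cs : List Char) (m : Nat) (p : List Char) (t : Nat) : List Nat :=
  (List.range' t (cs.length - m + 1 - t)).filter (fun j => pvWin cs m j == p)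
def pvG (m : Nat) : List Nat → Nat → Nat
  | [], _ => 0
  | j :: r, t => if t ≤ j then pvG m r (j + m) + 1 else pvG m r t
theorem pvG_congr_thr (m : Nat) (l : List Nat) (t t' : Nat) (h : t ≤ t')
    (hall : ∀ j ∈ l, t' ≤ j) : pvG m l t = pvG m l t' := by
  cases l with
  | nil => rfl
  | cons j r =>
    have hj : t' ≤ j := hall j (by simp)
    simp [pvG, Nat.le_trans h hj, hj]
theorem pvOccFrom_nil (cs : List Char) (m : Nat) (p : List Char) (t : Nat)
    (ht : cs.length - m + 1 ≤ t) : pvOccFrom cs m p t = [] := by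
  unfold pvOccFrom
  have : cs.length - m + 1 - t = 0 := by omega
  simp [this]
theorem pvOccFrom_cons (cs : List Char) (m : Nat) (p : List Char) (t : Nat)
    (ht : t ≤ cs.length - m) :
    pvOccFrom cs m p t =
      (if pvWin cs m t == p then [t] else []) ++ pvOccFrom cs m p (t + 1) := by
  unfold pvOccFrom
  have h1 : cs.length - m + 1 - t = (cs.length - m + 1 - (t+1)) + 1 := by omega
  rw [h1, List.range'_succ, List.filter_cons]
  split <;> simp_all
theorem pvG_occ_skip (cs : List Char) (m : Nat) (p : List Char) (thr : Nat) :
    ∀ t, t ≤ thr → pvG m (pvOccFrom cs m p t) thr = pvG m (pvOccFrom cs m p thr) thr := by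
  intro t ht
  induction hk : thr - t generalizing t with
  | zero => have : t = thr := by omega
            subst this; rfl
  | succ k ih =>
    have htlt : t < thr := by omega
    by_cases hN : t ≤ cs.length - m
    · rw [pvOccFrom_cons cs m p t hN]
      have step : pvG m ((if pvWin cs m t == p then [t] else []) ++ pvOccFrom cs m p (t+1)) thr
          = pvG m (pvOccFrom cs m p (t+1)) thr := by
        split
        · simp only [List.singleton_append, pvG]
          rw [if_neg (by omega)]
        · simp
      rw [step, ih (t+1) (by omega) (by omega)]
    · rw [pvOccFrom_nil cs m p t (by omega), pvOccFrom_nil cs m p thr (by omega)]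

theorem pvOccFrom_mem_ge (cs : List Char) (m : Nat) (p : List Char) (t j : Nat)
    (h : j ∈ pvOccFrom cs m p t) : t ≤ j := by
  unfold pvOccFrom at h
  have := (List.mem_filter.mp h).1
  exact (List.mem_range'_1.mp this).1

theorem pv_go_cons (p : List Char) (f acc : Nat) (h : Char) (t : List Char) :
    PySem.Chars.count.go p (f+1) (h::t) acc =
      if p.isPrefixOf (h::t) then PySem.Chars.count.go p f ((h::t).drop p.length) (acc+1)
      else PySem.Chars.count.go p f t acc := rfl

theorem pv_count_go_eq (cs p : List Char) (m : Nat) (hp : p.length = m) (hm : 1 ≤ m)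
    (hnm : m ≤ cs.length) :
    ∀ fuel t acc, cs.length - t ≤ fuel → t ≤ cs.length →
      PySem.Chars.count.go p fuel (cs.drop t) acc = acc + pvG m (pvOccFrom cs m p t) t := by
  intro fuel
  induction fuel with
  | zero =>
    intro t acc hf ht
    have ht' : t = cs.length := by omega
    have hnil : cs.drop t = [] := by subst ht'; simp
    rw [hnil, pvOccFrom_nil cs m p t (by omega)]
    rfl
  | succ fuel ih =>
    intro t acc hf ht
    cases hd : cs.drop t with
    | nil =>
      have : cs.length ≤ t := by
        have := List.drop_eq_nil_iff.mp hd
        omega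
      rw [pvOccFrom_nil cs m p t (by omega)]
      rfl
    | cons h tl =>
      have htlt : t < cs.length := by
        by_contra hcon
        have : cs.drop t = [] := List.drop_eq_nil_of_le (by omega)
        simp [this] at hd
      rw [pv_go_cons p fuel acc h tl, ← hd]
      by_cases hpre : p <+: cs.drop t
      · have hisp : p.isPrefixOf (cs.drop t) = true := List.isPrefixOf_iff_prefix.mpr hpre
        have hlen : m ≤ cs.length - t := by
          have := hpre.length_le
          rw [hp] at this
          simpa using this
        have htN : t ≤ cs.length - m := by omega
        have hwin : pvWin cs m t = p := by
          have := List.prefix_iff_eq_take.mp hpre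
          rw [hp] at this
          exact this.symm
        have hdrop2 : (cs.drop t).drop p.length = cs.drop (t + m) := by
          rw [hp, List.drop_drop]
        rw [hisp]
        rw [if_pos rfl]
        rw [hdrop2]
        rw [ih (t + m) (acc + 1) (by omega) (by omega)]
        rw [pvOccFrom_cons cs m p t htN, hwin]
        simp only [beq_self_eq_true, List.singleton_append, pvG, le_refl, if_pos]
        rw [pvG_occ_skip cs m p (t + m) (t + 1) (by omega)]
        omega
      · have hisp : p.isPrefixOf (cs.drop t) = false := by
          by_contra hcon
          exact hpre (List.isPrefixOf_iff_prefix.mp (by revert hcon; cases p.isPrefixOf (cs.drop t) <;> simp))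
        have htl : tl = cs.drop (t + 1) := by
          have : (cs.drop t).drop 1 = cs.drop (t + 1) := by rw [List.drop_drop]
          rw [hd] at this
          simpa using this
        rw [hisp]
        simp only [Bool.false_eq_true, if_false]
        rw [htl, ih (t + 1) acc (by omega) (by omega)]
        have hq : (pvWin cs m t == p) = false := by
          apply beq_eq_false_iff_ne.mpr
          intro he
          exact hpre (he ▸ List.take_prefix m (cs.drop t))
        by_cases htN : t ≤ cs.length - m
        · rw [pvOccFrom_cons cs m p t htN, hq]
          simp only [Bool.false_eq_true, if_false, List.nil_append]
          have := pvG_congr_thr m (pvOccFrom cs m p (t+1)) t (t+1) (by omega)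
            (fun j hj => pvOccFrom_mem_ge cs m p (t+1) j hj)
          omega
        · rw [pvOccFrom_nil cs m p t (by omega), pvOccFrom_nil cs m p (t+1) (by omega)]
          simp [pvG]

theorem pv_count_eq_G (cs p : List Char) (m : Nat) (hp : p.length = m) (hm : 1 ≤ m)
    (hnm : m ≤ cs.length) :
    PySem.Chars.count cs p = pvG m (pvOccFrom cs m p 0) 0 := by
  have hpne : p.isEmpty = false := by
    cases p with
    | nil => simp at hp; omega
    | cons a b => rfl
  have := pv_count_go_eq cs p m hp hm hnm cs.length 0 0 (by omega) (by omega)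
  simpa [PySem.Chars.count, hpne] using this


-- first-occurrence dedup against a seen set (abstract form of A's tracker and of dict key insertion order)
def pvDedup (seen : PySem.Set (List Char)) : List (List Char) → List (List Char)
  | [] => []
  | w :: ws => if PySem.Set.contains seen w then pvDedup seen ws
               else w :: pvDedup (PySem.Set.add seen w) ws

theorem pvUpdate_eq_dedup : ∀ (ws : List (List Char)) (s : PySem.Set (List Char)),
    PySem.Set.update s ws = s ++ pvDedup s ws := by
  intro ws
  induction ws with
  | nil => intro s; simp [PySem.Set.update, pvDedup]
  | cons w ws ih =>
    intro s
    have hstep : PySem.Set.update s (w :: ws) = PySem.Set.update (PySem.Set.add s w) ws := rfl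
    by_cases hm : w ∈ s
    · have hadd : PySem.Set.add s w = s := by simp [PySem.Set.add, hm]
      rw [hstep, hadd, ih s]
      have : pvDedup s (w :: ws) = pvDedup s ws := by simp [pvDedup, hm]
      rw [this]
    · have hadd : PySem.Set.add s w = s ++ [w] := by simp [PySem.Set.add, hm]
      rw [hstep, ih (PySem.Set.add s w)]
      have : pvDedup s (w :: ws) = w :: pvDedup (PySem.Set.add s w) ws := by
        simp [pvDedup, hm]
      rw [this, hadd]
      simp

theorem pvDedup_append : ∀ (xs : List (List Char)) (s : PySem.Set (List Char)) (ys : List (List Char)),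
    pvDedup s (xs ++ ys) = pvDedup s xs ++ pvDedup (PySem.Set.update s xs) ys := by
  intro xs
  induction xs with
  | nil => intro s ys; rfl
  | cons x xs ih =>
    intro s ys
    have hstep : PySem.Set.update s (x :: xs) = PySem.Set.update (PySem.Set.add s x) xs := rfl
    by_cases hm : x ∈ s
    · have hadd : PySem.Set.add s x = s := by simp [PySem.Set.add, hm]
      have hL : pvDedup s ((x :: xs) ++ ys) = pvDedup s (xs ++ ys) := by simp [pvDedup, hm]
      have hR : pvDedup s (x :: xs) = pvDedup s xs := by simp [pvDedup, hm]
      rw [hL, hR, ih, hstep, hadd]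
    · have hL : pvDedup s ((x :: xs) ++ ys)
          = x :: pvDedup (PySem.Set.add s x) (xs ++ ys) := by simp [pvDedup, hm]
      have hR : pvDedup s (x :: xs) = x :: pvDedup (PySem.Set.add s x) xs := by
        simp [pvDedup, hm]
      rw [hL, hR, ih, hstep]
      simp

theorem pvOfList_eq_dedup (ws : List (List Char)) :
    PySem.Set.ofList ws = pvDedup PySem.Set.empty ws := by
  have h1 : PySem.Set.ofList ws = PySem.Set.update PySem.Set.empty ws := rfl
  rw [h1, pvUpdate_eq_dedup]
  rfl

theorem pvMem_dedup_nil (ws : List (List Char)) (x : List Char) :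
    x ∈ pvDedup ([] : PySem.Set (List Char)) ws ↔ x ∈ ws := by
  have h := PySem.Set.mem_ofList ws x
  rw [pvOfList_eq_dedup] at h
  exact h

-- A's tracker loop as a sum over the first occurrences of the windows
theorem pvA_loop (cs : List Char) (m : Nat) : ∀ (l : List Nat) (s0 : PySem.Set (List Char)) (r0 : Int),
    (l.foldl (fun (st : PySem.Set (List Char) × Int) j =>
        if PySem.Set.contains st.1 (List.take m (List.drop j cs)) then st
        else (PySem.Set.add st.1 (List.take m (List.drop j cs)),
              st.2 + (PySem.Chars.count cs (List.take m (List.drop j cs)) : Int) - 1)) (s0, r0)).2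
    = r0 + ((pvDedup s0 (l.map (fun j => List.take m (List.drop j cs)))).map
        (fun w => (PySem.Chars.count cs w : Int) - 1)).sum := by
  intro l
  induction l with
  | nil => intro s0 r0; simp [pvDedup]
  | cons j l ih =>
    intro s0 r0
    simp only [List.foldl_cons, List.map_cons, pvDedup]
    by_cases hc : PySem.Set.contains s0 (List.take m (List.drop j cs)) = true
    · simp only [hc, if_true, ih]
    · simp only [hc, Bool.false_eq_true, if_false, ih]
      simp only [List.map_cons, List.sum_cons]
      ring

-- B's greedy scan over a position list computes pvG
theorem pvB_greedy (m : Nat) : ∀ (l : List Nat) (c : Int) (t : Nat),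
    ((List.map (Nat.cast : Nat → Int) l).foldl
      (fun (st : Int × Int) i => if st.2 ≤ i then (st.1 + 1, i + (m : Int)) else st) (c, (t : Int))).1
    = c + (pvG m l t : Int) := by
  intro l
  induction l with
  | nil => intro c t; simp [pvG]
  | cons j r ih =>
    intro c t
    rw [List.map_cons, List.foldl_cons]
    have hcond : ((c, (t:Int)).2 ≤ ((Nat.cast j : Int))) ↔ (t ≤ j) := by simp
    by_cases h : t ≤ j
    · rw [if_pos (hcond.mpr h)]
      have h2 : ((j : Int) + (m : Int)) = ((j + m : Nat) : Int) := by push_cast; ring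
      rw [h2, ih (c + 1) (j + m)]
      simp only [pvG, h, if_true]
      push_cast
      ring
    · rw [if_neg (fun hx => h (hcond.mp hx))]
      rw [ih c t]
      simp only [pvG, h, if_false]

-- B's totalling loop over the value lists as a sum
theorem pvB_loop (mrs : Int) : ∀ (l : List (List Int)) (r0 : Int),
    (l.foldl (fun total ps =>
        total + (((ps.foldl (fun (st : Int × Int) i =>
            if st.2 ≤ i then (st.1 + 1, i + mrs) else st) (0, 0)).1) - 1)) r0)
    = r0 + (l.map (fun ps =>
        ((ps.foldl (fun (st : Int × Int) i =>
            if st.2 ≤ i then (st.1 + 1, i + mrs) else st) (0, 0)).1) - 1)).sum := by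
  intro l
  induction l with
  | nil => intro r0; simp
  | cons ps l ih =>
    intro r0
    simp only [List.foldl_cons, List.map_cons, List.sum_cons]
    rw [ih]
    ring

theorem pvWin_length (cs : List Char) (m j : Nat) (hj : j ≤ cs.length - m)
    (hm : m ≤ cs.length) : (List.take m (List.drop j cs)).length = m := by
  simp [List.length_take, List.length_drop]
  omega

-- value of B's summand at any key of window length: greedy count = str.count
theorem pvKey_eval (cs : List Char) (m : Nat) (hm : 1 ≤ m) (hnm : m ≤ cs.length)
    (k : List Char) (hklen : k.length = m) :
    ((List.map (Nat.cast : Nat → Int) (pvOccFrom cs m k 0)).foldl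
        (fun (st : Int × Int) i => if st.2 ≤ i then (st.1 + 1, i + (m : Int)) else st) (0, 0)).1 - 1
      = (PySem.Chars.count cs k : Int) - 1 := by
  have hcount : PySem.Chars.count cs k = pvG m (pvOccFrom cs m k 0) 0 :=
    pv_count_eq_G cs k m hklen hm hnm
  have hg := pvB_greedy m (pvOccFrom cs m k 0) 0 0
  simp only [Nat.cast_zero] at hg
  rw [hg, hcount]
  ring

-- a window occurring only at the last start position occurs exactly once
theorem pvOcc_last (cs : List Char) (m N : Nat) (hm : 1 ≤ m) (hn : cs.length = N + m)
    (hnot : ∀ j < N, pvWin cs m j ≠ pvWin cs m N) :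
    pvOccFrom cs m (pvWin cs m N) 0 = [N] := by
  unfold pvOccFrom
  have hlen : cs.length - m + 1 - 0 = N + 1 := by omega
  rw [hlen, ← List.range_eq_range', List.range_succ, List.filter_append]
  have h1 : (List.range N).filter (fun j => pvWin cs m j == pvWin cs m N) = [] := by
    apply List.filter_eq_nil_iff.mpr
    intro j hj
    simp only [beq_iff_eq]
    exact hnot j (List.mem_range.mp hj)
  rw [h1]
  simp

-- ===== VERDICT (by name: the statement is the Claim_ definition above) =====
theorem find_number_of_non_overlapping_repeats_spec : Claim_equal_find_number_of_non_overlapping_repeats := by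
  intro string mrs hdom hpre
  have hpre1 : 1 ≤ mrs := hpre
  unfold Spec_find_number_of_non_overlapping_repeats
  obtain ⟨m, rfl⟩ : ∃ m : Nat, mrs = ((m : Nat) : Int) := ⟨mrs.toNat, by omega⟩
  have hm1 : 1 ≤ m := by exact_mod_cast hpre1
  unfold find_number_of_non_overlapping_repeats find_number_of_non_overlapping_repeats_alt
  rw [if_neg (show ¬ ((m:Int) < 1) by omega), if_neg (show ¬ ((m:Int) < 1) by omega)]
  simp only [PySem.Str.len_eq]
  by_cases hsm : ((string.toList.length : Int) < (m : Int))
  · rw [if_pos hsm, if_pos hsm]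
  · rw [if_neg hsm, if_neg hsm]
    set n := string.toList.length with hn
    have hnm : m ≤ n := by omega
    set N := n - m with hNdef
    have hn' : n = N + m := by omega
    have hNc : (n : Int) - (m : Int) = ((N : Nat) : Int) := by omega
    rw [hNc]
    have hNc2 : ((N : Nat) : Int) + 1 = ((N + 1 : Nat) : Int) := by push_cast; ring
    rw [hNc2]
    rw [PySem.List.pyRange_zero_natCast, PySem.List.pyRange_zero_natCast]
    rw [List.foldl_map, List.foldl_map]
    simp only [PySem.List.slice_natCast_add]
    rw [pvA_loop string.toList m (List.range N) PySem.Set.empty 0]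
    rw [pvB_loop]
    set D := (List.foldl (fun x y => x.modify (List.take m (List.drop y string.toList)) [] fun x => x ++ [(y : Int)])
              PySem.Dict.empty (List.range (N + 1))) with hD
    have hkeys : D.keys = PySem.Set.update ([] : PySem.Set (List Char))
        ((List.range (N+1)).map (fun j => List.take m (List.drop j string.toList))) := by
      rw [hD]
      have h1 := PySem.Dict.keys_foldl_modify_key (List.range (N+1))
        (fun j => List.take m (List.drop j string.toList)) ([] : List Int)
        (fun _ j v => v ++ [(j : Int)]) PySem.Dict.empty
      simpa [PySem.Dict.keys_empty] using h1
    have hnodup : D.keys.Nodup := by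
      rw [hD]
      exact PySem.Dict.nodup_keys_foldl_modify_key (List.range (N+1))
        (fun j => List.take m (List.drop j string.toList)) ([] : List Int)
        (fun _ j v => v ++ [(j : Int)]) PySem.Dict.empty PySem.Dict.nodup_keys_empty
    have hvals : D.values = D.keys.map (fun k => D.getD k []) :=
      PySem.Dict.values_eq_map_keys D hnodup []
    have hgetD : ∀ p : List Char, D.getD p []
        = List.map (Nat.cast : Nat → Int) (pvOccFrom string.toList m p 0) := by
      intro p
      have h0 := PySem.Dict.getD_foldl_modify_append
        ((List.range (N+1)).map (fun j => (List.take m (List.drop j string.toList), (Nat.cast j : Int))))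
        PySem.Dict.empty p
      simp only [List.foldl_map, List.filter_map, List.map_map, Function.comp_def,
        PySem.Dict.getD_empty, List.nil_append] at h0
      have hocc : pvOccFrom string.toList m p 0
          = (List.range (N+1)).filter (fun j => List.take m (List.drop j string.toList) == p) := by
        unfold pvOccFrom pvWin
        rw [List.range_eq_range']
        congr 1
      rw [hD, hocc]
      exact h0
    rw [hvals, List.map_map]
    simp only [Function.comp_def, hgetD]
    rw [hkeys, List.range_succ, List.map_append, pvUpdate_eq_dedup, List.nil_append,
        pvDedup_append]
    simp only [List.map_cons, List.map_nil]
    have hcs_len : string.toList.length = N + m := by omega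
    have hmain : ∀ k ∈ pvDedup ([] : PySem.Set (List Char))
        ((List.range N).map (fun j => List.take m (List.drop j string.toList))),
        ((List.map (Nat.cast : Nat → Int) (pvOccFrom string.toList m k 0)).foldl
            (fun (st : Int × Int) i => if st.2 ≤ i then (st.1 + 1, i + (m : Int)) else st) (0, 0)).1 - 1
          = (PySem.Chars.count string.toList k : Int) - 1 := by
      intro k hk
      have hkW : k ∈ (List.range N).map (fun j => List.take m (List.drop j string.toList)) :=
        (pvMem_dedup_nil _ _).mp hk
      obtain ⟨j, hjmem, rfl⟩ := List.mem_map.mp hkW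
      have hjN : j < N := List.mem_range.mp hjmem
      exact pvKey_eval string.toList m hm1 (by omega) _
        (pvWin_length string.toList m j (by omega) (by omega))
    rw [List.map_append, List.sum_append]
    rw [List.map_congr_left hmain]
    by_cases hlast : List.take m (List.drop N string.toList)
        ∈ (List.range N).map (fun j => List.take m (List.drop j string.toList))
    · have hctrue : PySem.Set.contains (PySem.Set.update ([] : PySem.Set (List Char))
          ((List.range N).map (fun j => List.take m (List.drop j string.toList))))
          (List.take m (List.drop N string.toList)) = true := by
        rw [PySem.Set.contains_eq_decide]
        apply decide_eq_true
        rw [pvUpdate_eq_dedup, List.nil_append]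
        exact (pvMem_dedup_nil _ _).mpr hlast
      simp only [pvDedup, hctrue, if_true]
      simp [PySem.Set.empty]
    · have hcfalse : PySem.Set.contains (PySem.Set.update ([] : PySem.Set (List Char))
          ((List.range N).map (fun j => List.take m (List.drop j string.toList))))
          (List.take m (List.drop N string.toList)) = false := by
        rw [PySem.Set.contains_eq_decide]
        apply decide_eq_false
        intro hmem
        rw [pvUpdate_eq_dedup, List.nil_append] at hmem
        exact hlast ((pvMem_dedup_nil _ _).mp hmem)
      simp only [pvDedup, hcfalse, Bool.false_eq_true, if_false]
      have hnot : ∀ j < N, pvWin string.toList m j ≠ pvWin string.toList m N := by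
        intro j hj heq
        exact hlast (List.mem_map.mpr ⟨j, List.mem_range.mpr hj, heq⟩)
      have hocc : pvOccFrom string.toList m (List.take m (List.drop N string.toList)) 0 = [N] := by
        have := pvOcc_last string.toList m N hm1 hcs_len hnot
        simpa [pvWin] using this
      simp only [List.map_cons, List.map_nil, List.sum_cons, List.sum_nil]
      rw [hocc]
      have hg := pvB_greedy m [N] 0 0
      simp only [Nat.cast_zero] at hg
      rw [hg]
      simp [pvG, PySem.Set.empty]
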